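-- pv_equiv track=rewrite | github.com/Club-ALTech/crc2026-prelim | Prelim_special/game_visuals.py | compute_pixel_x
-- ===== SOURCE A (Python) =====
-- FLOOR_SIZE = 40         # 60×60
--
-- WALL_THICKNESS = 6     # 10 px thickness
--
-- def compute_pixel_x(x):
--     px = 0
--     for i in range(x):
--         if i % 2 == 1:     # odd = floor tile or horizontal wall
--             px += FLOOR_SIZE
--         else:             # even = vertical wall or connector
--             px += WALL_THICKNESS
--     return px
-- ===== SOURCE B (Python) =====
-- FLOOR_SIZE = 40
--
-- WALL_THICKNESS = 6
--
-- def compute_pixel_x(x):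
--     # Closed form: indices 0..x-1 contain x//2 odd values (each FLOOR_SIZE)
--     # and x - x//2 even values (each WALL_THICKNESS); empty range for x <= 0.
--     if x <= 0:
--         return 0
--     odds = x // 2
--     return odds * FLOOR_SIZE + (x - odds) * WALL_THICKNESS
-- ===== Notes on version B (the rewrite author's own statement) =====
-- stated objective: faster
-- what changed: Replaced the per-index loop over range(x) with a closed-form count of odd/even indices: x//2 odds times FLOOR_SIZE plus (x - x//2) evens times WALL_THICKNESS.
import Mathlib
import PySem

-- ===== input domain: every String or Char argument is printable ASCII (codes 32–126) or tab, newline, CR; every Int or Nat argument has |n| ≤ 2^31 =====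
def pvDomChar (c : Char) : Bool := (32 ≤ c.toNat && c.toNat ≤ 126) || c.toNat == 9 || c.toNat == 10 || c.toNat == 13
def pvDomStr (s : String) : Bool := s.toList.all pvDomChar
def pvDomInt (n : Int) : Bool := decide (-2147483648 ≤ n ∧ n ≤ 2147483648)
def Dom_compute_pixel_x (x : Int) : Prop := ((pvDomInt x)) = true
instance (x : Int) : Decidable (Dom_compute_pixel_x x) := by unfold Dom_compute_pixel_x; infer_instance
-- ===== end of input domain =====

-- B replaces A's O(x) loop by an O(1) closed form counting odd and even indices.

-- ===== PORT A =====
def compute_pixel_x (x : Int) : Int :=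
  (PySem.List.pyRange 0 x 1).foldl
    (fun px i => if PySem.Int.mod i 2 = 1 then px + 40 else px + 6) 0

-- ===== PORT B =====
def compute_pixel_x_alt (x : Int) : Int :=
  if x ≤ 0 then 0
  else
    let odds := PySem.Int.floordiv x 2
    odds * 40 + (x - odds) * 6

-- ===== PRECONDITION & SPEC =====
def Spec_compute_pixel_x (x : Int) (out : Int) : Prop := out = compute_pixel_x_alt x
instance (x : Int) (out : Int) : Decidable (Spec_compute_pixel_x x out) := by unfold Spec_compute_pixel_x; infer_instance

-- ===== CLAIM (what is proved, stated in full; the proofs are below) =====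
def Claim_equal_compute_pixel_x : Prop := ∀ (x : Int), Dom_compute_pixel_x x → Spec_compute_pixel_x x (compute_pixel_x x)

-- ===== LEMMAS AND PROOFS =====

theorem pv_loop_closed (n : Nat) :
    (PySem.List.pyRange 0 (n : Int) 1).foldl
      (fun px i => if PySem.Int.mod i 2 = 1 then px + 40 else px + 6) 0
      = ((n / 2 : Nat) : Int) * 40 + ((n : Int) - ((n / 2 : Nat) : Int)) * 6 := by
  induction n with
  | zero =>
    rw [PySem.List.pyRange_one_eq_nil (by omega)]
    norm_num
  | succ m ih =>
    have hc : (((m + 1 : Nat)) : Int) = (m : Int) + 1 := by push_cast; ring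
    have hsplit : PySem.List.pyRange 0 ((m : Int) + 1) 1
        = PySem.List.pyRange 0 (m : Int) 1 ++ [(m : Int)] :=
      PySem.List.pyRange_one_succ_right (by omega)
    rw [hc, hsplit, List.foldl_append, ih]
    simp only [List.foldl_cons, List.foldl_nil]
    have hmod : PySem.Int.mod (m : Int) 2 = ((m % 2 : Nat) : Int) :=
      PySem.Int.mod_natCast m 2
    rw [hmod]
    split_ifs with h
    · have h2 : m % 2 = 1 := by exact_mod_cast h
      omega
    · have h2 : m % 2 = 0 := by omega
      omega

-- ===== VERDICT (by name: the statement is the Claim_ definition above) =====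
theorem compute_pixel_x_spec : Claim_equal_compute_pixel_x := by
  intro x _
  unfold Spec_compute_pixel_x compute_pixel_x compute_pixel_x_alt
  by_cases hx : x ≤ 0
  · rw [if_pos hx, PySem.List.pyRange_one_eq_nil (by omega)]
    simp
  · rw [if_neg hx]
    obtain ⟨n, rfl⟩ : ∃ n : Nat, x = (n : Int) := ⟨x.toNat, by omega⟩
    rw [pv_loop_closed]
    have : PySem.Int.floordiv (n : Int) 2 = ((n / 2 : Nat) : Int) :=
      PySem.Int.floordiv_natCast n 2
    rw [this]
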